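-- pv_equiv track=rewrite | github.com/kimhs0716/BOJ | 백준/Gold/1339. 단어 수학/단어 수학.py | solve
-- ===== SOURCE A (Python) =====
-- def ev(s, ch):
--     ret = 0
--     i = 1
--     for c in reversed(s):
--         ret += i * (c == ch)
--         i *= 10
--     return ret
--
-- def solve(sarr):
--     alpha = list('ABCDEFGHIJKLMNOPQRSTUVWXYZ')
--     arr = {i: 0 for i in alpha}
--     for s in sarr:
--         temp_arr = {}
--         for i in alpha:
--             temp_arr[i] = ev(s, i)
--         for i in temp_arr:
--             arr[i] += temp_arr[i]
--     alpha.sort(key=lambda x: -arr[x])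
--     ret = 0
--     for i in range(10):
--         ret += arr[alpha[i]] * (9 - i)
--     return ret
-- ===== SOURCE B (Python) =====
-- ALPHA = 'ABCDEFGHIJKLMNOPQRSTUVWXYZ'
--
-- def solve(sarr):
--     coeff = {}
--     for s in sarr:
--         place = 1
--         for c in reversed(s):
--             if 'A' <= c <= 'Z':
--                 coeff[c] = coeff.get(c, 0) + place
--             place *= 10
--     vals = sorted((coeff.get(c, 0) for c in ALPHA), reverse=True)
--     return sum(v * (9 - i) for i, v in enumerate(vals[:10]))
-- ===== Notes on version B (the rewrite author's own statement) =====
-- stated objective: faster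
-- what changed: B makes a single right-to-left pass over each word, adding each uppercase character's place value directly into a coefficient dictionary (instead of A's 26 full ev-scans per word plus a temp dict merge), and then sorts the 26 coefficient values directly in descending order instead of sorting the letters by a negated-key.
import Mathlib
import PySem

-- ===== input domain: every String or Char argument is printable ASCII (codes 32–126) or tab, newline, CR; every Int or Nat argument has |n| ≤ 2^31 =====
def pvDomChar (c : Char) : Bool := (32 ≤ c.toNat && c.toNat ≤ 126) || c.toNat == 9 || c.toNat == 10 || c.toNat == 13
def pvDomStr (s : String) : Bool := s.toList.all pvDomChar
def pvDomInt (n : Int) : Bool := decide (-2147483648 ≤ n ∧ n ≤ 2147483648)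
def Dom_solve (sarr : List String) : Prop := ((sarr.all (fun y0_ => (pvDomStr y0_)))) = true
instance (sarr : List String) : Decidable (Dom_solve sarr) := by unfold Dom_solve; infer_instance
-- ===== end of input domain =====

-- B replaces A's 26 scans per word (ev for every letter) by one right-to-left pass per word that
-- adds each uppercase character's place value into a dictionary, then sorts the 26 coefficient
-- values directly instead of sorting the letters by key.

-- ===== PORT A =====
def ev (s : String) (ch : Char) : Int :=
  (s.toList.reverse.foldl
      (fun (p : Int × Int) c => (p.1 + p.2 * (if c = ch then 1 else 0), p.2 * 10)) (0, 1)).1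

def alphaL : List Char := "ABCDEFGHIJKLMNOPQRSTUVWXYZ".toList

def solve (sarr : List String) : Int :=
  let arr0 : PySem.Dict Char Int := alphaL.foldl (fun d i => d.insert i 0) PySem.Dict.empty
  let arr := sarr.foldl (fun arr s =>
      let temp := alphaL.foldl (fun t i => t.insert i (ev s i)) PySem.Dict.empty
      temp.items.foldl (fun a p => a.insert p.1 (a.getD p.1 0 + p.2)) arr) arr0
  let alphaSorted := PySem.List.sorted alphaL (fun x => -(arr.getD x 0)) false
  -- 'arr[alpha[i]]' can neither raise IndexError (len 26) nor KeyError; the 'none => 0' arm is unreachable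
  (PySem.List.pyRange 0 10 1).foldl
    (fun ret i =>
      ret + (match PySem.List.pyGet? alphaSorted i with
             | some c => arr.getD c 0
             | none => 0) * (9 - i)) 0

-- ===== PORT B =====
def solve_alt (sarr : List String) : Int :=
  let coeff := sarr.foldl (fun d s =>
      (s.toList.reverse.foldl
          (fun (p : PySem.Dict Char Int × Int) c =>
            (if 'A' ≤ c ∧ c ≤ 'Z' then p.1.insert c (p.1.getD c 0 + p.2) else p.1, p.2 * 10))
          (d, 1)).1) PySem.Dict.empty
  let vals := PySem.List.sorted (alphaL.map (fun c => coeff.getD c 0)) (fun v => v) true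
  (PySem.List.enumerate (PySem.List.slice vals none (some 10)) 0).foldl
    (fun acc p => acc + p.2 * (9 - p.1)) 0

-- ===== PRECONDITION & SPEC =====
def Spec_solve (sarr : List String) (out : Int) : Prop := out = solve_alt sarr
instance (sarr : List String) (out : Int) : Decidable (Spec_solve sarr out) := by unfold Spec_solve; infer_instance

-- ===== CLAIM (what is proved, stated in full; the proofs are below) =====
def Claim_equal_solve : Prop := ∀ (sarr : List String), Dom_solve sarr → Spec_solve sarr (solve sarr)

-- ===== LEMMAS AND PROOFS =====

-- place-value sum of the occurrences of c in l, first element worth i, next i*10, …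
def psum (l : List Char) (c : Char) (i : Int) : Int :=
  match l with
  | [] => 0
  | x :: xs => (if x = c then i else 0) + psum xs c (i * 10)

theorem ev_eq_psum (l : List Char) (ch : Char) :
    ∀ (r i : Int),
      (l.foldl (fun (p : Int × Int) c => (p.1 + p.2 * (if c = ch then 1 else 0), p.2 * 10)) (r, i)).1
        = r + psum l ch i := by
  induction l with
  | nil => intro r i; simp [psum]
  | cons x xs ih =>
    intro r i
    simp only [List.foldl_cons]
    rw [ih]
    by_cases h : x = ch <;> simp [h, psum] <;> ring

theorem bstep_getD (l : List Char) (c : Char) :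
    ∀ (d : PySem.Dict Char Int) (i : Int),
      ((l.foldl
          (fun (p : PySem.Dict Char Int × Int) x =>
            (if 'A' ≤ x ∧ x ≤ 'Z' then p.1.insert x (p.1.getD x 0 + p.2) else p.1, p.2 * 10))
          (d, i)).1).getD c 0
        = d.getD c 0 + (if 'A' ≤ c ∧ c ≤ 'Z' then psum l c i else 0) := by
  induction l with
  | nil => intro d i; simp [psum]
  | cons x xs ih =>
    intro d i
    simp only [List.foldl_cons]
    rw [ih]
    by_cases hx : 'A' ≤ x ∧ x ≤ 'Z'
    · rw [if_pos hx, PySem.Dict.getD_insert]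
      by_cases hxc : x = c
      · subst hxc
        simp [psum, hx]
        ring
      · rw [if_neg (Ne.symm hxc)]
        by_cases hc : 'A' ≤ c ∧ c ≤ 'Z' <;> simp [hc, psum, hxc]
    · rw [if_neg hx]
      by_cases hc : 'A' ≤ c ∧ c ≤ 'Z'
      · have hxc : x ≠ c := by rintro rfl; exact hx hc
        simp [hc, psum, hxc]
      · simp [hc]

theorem alpha_eq : alphaL = ['A','B','C','D','E','F','G','H','I','J','K','L','M',
    'N','O','P','Q','R','S','T','U','V','W','X','Y','Z'] := by rfl

theorem alpha_nodup : alphaL.Nodup := by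
  rw [alpha_eq, List.nodup_iff_count_le_one]
  intro a
  by_cases h : a ∈ ['A','B','C','D','E','F','G','H','I','J','K','L','M',
    'N','O','P','Q','R','S','T','U','V','W','X','Y','Z']
  · fin_cases h <;> decide
  · rw [List.count_eq_zero_of_not_mem h]; omega

theorem alpha_upper : ∀ c ∈ alphaL, 'A' ≤ c ∧ c ≤ 'Z' := by
  rw [alpha_eq]; intro c hc; fin_cases hc <;> decide

-- the coefficient of letter c over the whole input
def coefS (sarr : List String) (c : Char) : Int :=
  (sarr.map (fun s => psum s.toList.reverse c 1)).sum

theorem astep_getD (l : List (Char × Int)) (c : Char) :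
    ∀ (d : PySem.Dict Char Int),
      (l.foldl (fun a p => a.insert p.1 (a.getD p.1 0 + p.2)) d).getD c 0
        = d.getD c 0 + ((l.filter (fun p => p.1 = c)).map (·.2)).sum := by
  induction l with
  | nil => intro d; simp
  | cons p ps ih =>
    intro d
    simp only [List.foldl_cons]
    rw [ih, PySem.Dict.getD_insert]
    by_cases h : p.1 = c
    · simp [h, add_assoc]
    · simp [h, Ne.symm h]

theorem temp_items (s : String) :
    (alphaL.foldl (fun t i => t.insert i (ev s i)) PySem.Dict.empty).items
      = alphaL.map (fun i => (i, ev s i)) := by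
  have := PySem.Dict.items_foldl_insert_fresh (l := alphaL) (k := fun i => i)
    (v := fun i => ev s i) (d := PySem.Dict.empty)
    (by intro a _; exact PySem.Dict.contains_empty a)
    (by simpa using alpha_nodup)
  simpa using this

theorem aword_getD (s : String) (c : Char) (hc : c ∈ alphaL) (d : PySem.Dict Char Int) :
    (((alphaL.foldl (fun t i => t.insert i (ev s i)) PySem.Dict.empty).items).foldl
        (fun a p => a.insert p.1 (a.getD p.1 0 + p.2)) d).getD c 0
      = d.getD c 0 + psum s.toList.reverse c 1 := by
  rw [astep_getD, temp_items]
  have hfil : (alphaL.map (fun i => (i, ev s i))).filter (fun p => p.1 = c)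
      = [(c, ev s c)] := by
    rw [List.filter_map]
    have : alphaL.filter (fun i => i = c) = [c] := by
      have h1 : alphaL.filter (fun i => i = c) = List.replicate (alphaL.count c) c := by
        simp [List.filter_eq]
      rw [h1, List.count_eq_one_of_mem alpha_nodup hc]
      simp
    simp [Function.comp_def, this]
  rw [hfil]
  have : ev s c = psum s.toList.reverse c 1 := by
    unfold ev; rw [ev_eq_psum]; ring
  simp [this]

theorem aloop_getD (sarr : List String) (c : Char) (hc : c ∈ alphaL) :
    ∀ (d : PySem.Dict Char Int),
      (sarr.foldl (fun arr s =>
          (((alphaL.foldl (fun t i => t.insert i (ev s i)) PySem.Dict.empty).items).foldl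
            (fun a p => a.insert p.1 (a.getD p.1 0 + p.2)) arr)) d).getD c 0
        = d.getD c 0 + coefS sarr c := by
  induction sarr with
  | nil => intro d; simp [coefS]
  | cons s ss ih =>
    intro d
    simp only [List.foldl_cons]
    rw [ih, aword_getD s c hc, coefS, coefS]
    simp [add_assoc]

theorem bloop_getD (sarr : List String) (c : Char) (hc : 'A' ≤ c ∧ c ≤ 'Z') :
    ∀ (d : PySem.Dict Char Int),
      (sarr.foldl (fun d s =>
          (s.toList.reverse.foldl
              (fun (p : PySem.Dict Char Int × Int) x =>
                (if 'A' ≤ x ∧ x ≤ 'Z' then p.1.insert x (p.1.getD x 0 + p.2) else p.1, p.2 * 10))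
              (d, 1)).1) d).getD c 0
        = d.getD c 0 + coefS sarr c := by
  induction sarr with
  | nil => intro d; simp [coefS]
  | cons s ss ih =>
    intro d
    simp only [List.foldl_cons]
    rw [ih, bstep_getD, if_pos hc, coefS, coefS]
    simp [add_assoc]

theorem arr0_getD : ∀ c ∈ alphaL,
    (alphaL.foldl (fun d i => d.insert i 0) (PySem.Dict.empty : PySem.Dict Char Int)).getD c 0 = 0 := by
  rw [alpha_eq]; intro c hc; fin_cases hc <;> decide

theorem final_sum (w : List Char) (g : Char → Int) (hw : w.length = 26) :
    (PySem.List.pyRange 0 10 1).foldl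
      (fun ret i => ret + (match PySem.List.pyGet? w i with
                           | some c => g c | none => 0) * (9 - i)) 0
    = (PySem.List.enumerate (PySem.List.slice (w.map g) none (some 10)) 0).foldl
        (fun acc p => acc + p.2 * (9 - p.1)) 0 := by
  rcases w with _|⟨c0,w⟩
  · simp at hw
  rcases w with _|⟨c1,w⟩
  · simp at hw
  rcases w with _|⟨c2,w⟩
  · simp at hw
  rcases w with _|⟨c3,w⟩
  · simp at hw
  rcases w with _|⟨c4,w⟩
  · simp at hw
  rcases w with _|⟨c5,w⟩
  · simp at hw
  rcases w with _|⟨c6,w⟩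
  · simp at hw
  rcases w with _|⟨c7,w⟩
  · simp at hw
  rcases w with _|⟨c8,w⟩
  · simp at hw
  rcases w with _|⟨c9,w⟩
  · simp at hw
  have hr : PySem.List.pyRange 0 10 1 = [0,1,2,3,4,5,6,7,8,9] := by decide
  have hs : PySem.List.slice ((c0::c1::c2::c3::c4::c5::c6::c7::c8::c9::w).map g) none (some 10)
      = [g c0, g c1, g c2, g c3, g c4, g c5, g c6, g c7, g c8, g c9] := by
    rw [PySem.List.slice_to _ (by norm_num)]
    have h10 : (10 : Int).toNat = 10 := rfl
    simp only [h10]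
    norm_num [List.take_succ_cons]
  rw [hr, hs]
  simp only [List.foldl_cons, List.foldl_nil, PySem.List.enumerate_cons, PySem.List.enumerate_nil]
  have hw16 : ((w.length : Int)) = 16 := by simp at hw; exact_mod_cast hw
  norm_num [PySem.List.pyGet?, PySem.List.pyIdx?, hw16]
  have ht2 : (Int.toNat 2) = 2 := rfl
  have ht3 : (Int.toNat 3) = 3 := rfl
  have ht4 : (Int.toNat 4) = 4 := rfl
  have ht5 : (Int.toNat 5) = 5 := rfl
  have ht6 : (Int.toNat 6) = 6 := rfl
  have ht7 : (Int.toNat 7) = 7 := rfl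
  have ht8 : (Int.toNat 8) = 8 := rfl
  simp only [ht2, ht3, ht4, ht5, ht6, ht7, ht8]
  norm_num

-- ===== VERDICT (by name: the statement is the Claim_ definition above) =====
theorem solve_spec : Claim_equal_solve := by
  intro sarr _
  unfold Spec_solve solve solve_alt
  simp only []
  -- final coefficient tables of the two ports
  set arrF := sarr.foldl (fun arr s =>
      ((alphaL.foldl (fun t i => t.insert i (ev s i)) PySem.Dict.empty).items).foldl
        (fun a p => a.insert p.1 (a.getD p.1 0 + p.2)) arr)
      (alphaL.foldl (fun d i => d.insert i 0) PySem.Dict.empty) with harrF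
  set coeffF := sarr.foldl (fun d s =>
      (s.toList.reverse.foldl
          (fun (p : PySem.Dict Char Int × Int) c =>
            (if 'A' ≤ c ∧ c ≤ 'Z' then p.1.insert c (p.1.getD c 0 + p.2) else p.1, p.2 * 10))
          (d, 1)).1) PySem.Dict.empty with hcoeffF
  have hA : ∀ c ∈ alphaL, arrF.getD c 0 = coefS sarr c := by
    intro c hc
    rw [harrF, aloop_getD sarr c hc, arr0_getD c hc]
    ring
  have hB : ∀ c ∈ alphaL, coeffF.getD c 0 = coefS sarr c := by
    intro c hc
    rw [hcoeffF, bloop_getD sarr c (alpha_upper c hc), PySem.Dict.getD_empty]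
    ring
  have hmap : alphaL.map (fun c => coeffF.getD c 0) = alphaL.map (fun c => arrF.getD c 0) := by
    apply List.map_congr_left
    intro c hc; rw [hA c hc, hB c hc]
  rw [hmap]
  set sA := PySem.List.sorted alphaL (fun x => -(arrF.getD x 0)) false with hsA
  have hlen : sA.length = 26 := by
    rw [hsA, PySem.List.length_sorted, alpha_eq]; rfl
  have hvals : sA.map (fun c => arrF.getD c 0)
      = PySem.List.sorted (alphaL.map (fun c => arrF.getD c 0)) (fun v => v) true := by
    apply List.Perm.eq_of_pairwise (le := fun a b : Int => b ≤ a)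
    · intro a b _ _ h1 h2; exact le_antisymm h2 h1
    · rw [List.pairwise_map]
      exact (PySem.List.sorted_pairwise alphaL _).imp (fun h => by omega)
    · exact PySem.List.sorted_pairwise_rev _ _
    · exact ((PySem.List.sorted_perm alphaL _ false).map _).trans (PySem.List.sorted_perm _ _ true).symm
  rw [← hvals]
  exact final_sum sA (fun c => arrF.getD c 0) hlen
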